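-- pv_equiv track=rewrite | github.com/Entangled-bits/Python_projects | Game-theory/Expectimax_algorithm.py | expectiMax_1
-- ===== SOURCE A (Python) =====
-- def group(list, branches):
-- 	new_list=[]
-- 	initial=0
-- 	final=initial+2
-- 	for j in range(len(list)//2):
-- 		new_list.append([])
-- 		for i in range(initial, final):
-- 			new_list[j].append(list[i])
-- 		initial=final
-- 		final=initial+2
-- 	return new_list
--
-- def chance(nodes, branches):
-- 	list=[]
-- 	for i in nodes:
-- 		sum=0
-- 		for j in i:
-- 			sum+=j
-- 			list.append(sum//len(i))
-- 	return group(list,branches)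
--
-- def max2(nodes, branches):
-- 	list=[]
-- 	for i in nodes:
-- 			list.append(max(i))
-- 	return group(list, branches)
--
-- def expectiMax_1(nodes, level, branches):
-- 	if level == 0:
-- 		return max(nodes)
-- 	if level%2==0:
-- 		return expectiMax_1(chance(nodes, branches), level-1, branches)
-- 	elif level==1:
-- 		return expectiMax_1(max(nodes), level-1, branches)
-- 	else:
-- 		return expectiMax_1(max2(nodes, branches),level-1, branches)
-- ===== SOURCE B (Python) =====
-- def group(lst, branches):
--     if len(lst) < 2:
--         return []
--     return [lst[:2]] + group(lst[2:], branches)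
--
-- def chance(nodes, branches):
--     flat = [sum(i[:k+1]) // len(i) for i in nodes for k in range(len(i))]
--     return group(flat, branches)
--
-- def max2(nodes, branches):
--     return group([max(i) for i in nodes], branches)
--
-- def expectiMax_1(nodes, level, branches):
--     for v in range(level, 1, -1):
--         if v % 2 == 0:
--             nodes = chance(nodes, branches)
--         else:
--             nodes = max2(nodes, branches)
--     if level >= 1:
--         nodes = max(nodes)
--     return max(nodes)
-- ===== Notes on version B (the rewrite author's own statement) =====
-- stated objective: alternative
-- what changed: expectiMax_1 becomes a single iterative countdown loop (one fold over range(level,1,-1)) instead of tail recursion, and the helpers are rewritten: group as a structural two-at-a-time recursion with slices instead of an index-bookkeeping double loop, chance and max2 as comprehensions over the data instead of accumulator loops.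
-- outside the precondition, e.g. on expectiMax_1([[1, 2]], 0, 2): A returns [1, 2], B returns [1, 2]; on expectiMax_1([[1, 2]], -1, 2): A raises RecursionError, B returns [1, 2]
import Mathlib
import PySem

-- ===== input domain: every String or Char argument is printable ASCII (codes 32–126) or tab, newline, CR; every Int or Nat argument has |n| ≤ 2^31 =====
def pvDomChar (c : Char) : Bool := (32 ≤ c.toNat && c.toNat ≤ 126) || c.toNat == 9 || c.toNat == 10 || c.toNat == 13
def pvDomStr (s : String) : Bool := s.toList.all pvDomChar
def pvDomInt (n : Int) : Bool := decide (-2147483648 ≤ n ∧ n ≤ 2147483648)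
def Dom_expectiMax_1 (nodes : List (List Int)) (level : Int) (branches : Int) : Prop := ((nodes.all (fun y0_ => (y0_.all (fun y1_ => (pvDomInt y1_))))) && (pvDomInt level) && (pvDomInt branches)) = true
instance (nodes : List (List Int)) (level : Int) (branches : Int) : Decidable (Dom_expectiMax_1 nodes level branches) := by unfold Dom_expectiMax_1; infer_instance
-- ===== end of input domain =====

-- B rewrites the tree reduction as one iterative pass (a fold over the level countdown) with
-- comprehension/recursion-style helpers, instead of A's tail recursion with index-driven loops; objective: simpler.

-- ===== PORT A =====

-- Python's builtin max over a list of ints (raises on []; the 0 branch is unreachable under Pre_)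
def pyMaxI : List Int → Int
  | [] => 0
  | x :: t => t.foldl max x

-- Python's builtin max over a list of int-lists (lexicographic, first maximal element);
-- [] stands for the ValueError on an empty list, unreachable under Pre_
def pyMaxL (nodes : List (List Int)) : List Int := (PySem.List.max? nodes (fun x => x)).getD []

-- group: for j in range(len(list)//2): append []; for i in range(initial, final): new_list[j].append(list[i])
-- state is (new_list, initial, final); list[i] is always in range here, so pyGetD is exact
def groupA (l : List Int) (branches : Int) : List (List Int) :=
  ((PySem.List.pyRange 0 (PySem.Int.floordiv (l.length : Int) 2) 1).foldl
    (fun (st : List (List Int) × Int × Int) j =>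
      let nl := st.1 ++ [([] : List Int)]
      let nl := (PySem.List.pyRange st.2.1 st.2.2 1).foldl
          (fun nl i => nl.modify j.toNat (fun row => row ++ [PySem.List.pyGetD l i 0])) nl
      (nl, st.2.2, st.2.2 + 2))
    (([] : List (List Int)), (0 : Int), (2 : Int))).1

-- chance: for i in nodes: sum=0; for j in i: sum+=j; list.append(sum//len(i))
def chanceA (nodes : List (List Int)) (branches : Int) : List (List Int) :=
  groupA (nodes.foldl
    (fun acc i =>
      (i.foldl (fun (st : List Int × Int) j =>
          (st.1 ++ [PySem.Int.floordiv (st.2 + j) (i.length : Int)], st.2 + j)) (acc, (0 : Int))).1)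
    ([] : List Int)) branches

-- max2: for i in nodes: list.append(max(i))
def max2A (nodes : List (List Int)) (branches : Int) : List (List Int) :=
  groupA (nodes.foldl (fun acc i => acc ++ [pyMaxI i]) ([] : List Int)) branches

-- the recursion of expectiMax_1, fuel = level (level ≥ 1 at entry); the level==1 branch recurses
-- into level 0 with the flat list max(nodes), so the two nested maxes are inlined there
def expAgo : List (List Int) → Nat → Int → Int
  | _, 0, _ => 0
  | nodes, 1, _ => pyMaxI (pyMaxL nodes)
  | nodes, (n+2), branches =>
      if PySem.Int.mod ((n : Int) + 2) 2 == 0 then expAgo (chanceA nodes branches) (n+1) branches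
      else expAgo (max2A nodes branches) (n+1) branches

-- level == 0 returns max(nodes), a LIST, not an int (outside the declared return type), and
-- negative level never terminates; both are excluded by Pre_, 0 stands in
def expectiMax_1 (nodes : List (List Int)) (level : Int) (branches : Int) : Int :=
  if level ≤ 0 then 0 else expAgo nodes level.toNat branches

-- ===== PORT B =====

-- group: if len(lst) < 2: return []; return [lst[:2]] + group(lst[2:], branches)
def groupB : List Int → Int → List (List Int)
  | a :: b :: t, branches => [a, b] :: groupB t branches
  | _, _ => []

-- chance: group([sum(i[:k+1]) // len(i) for i in nodes for k in range(len(i))], branches)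
def chanceB (nodes : List (List Int)) (branches : Int) : List (List Int) :=
  groupB (nodes.flatMap (fun i =>
    (List.range i.length).map (fun k => PySem.Int.floordiv ((i.take (k+1)).sum) (i.length : Int)))) branches

-- max2: group([max(i) for i in nodes], branches)
def max2B (nodes : List (List Int)) (branches : Int) : List (List Int) :=
  groupB (nodes.map (fun i => pyMaxI i)) branches

-- for v in range(level, 1, -1): nodes = chance/max2; if level >= 1: nodes = max(nodes); return max(nodes)
-- (for level ≤ 0 Python B's value is a list, outside the declared type and Pre_; 0 stands in)
def expectiMax_1_alt (nodes : List (List Int)) (level : Int) (branches : Int) : Int :=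
  let ns := (PySem.List.pyRange level 1 (-1)).foldl
      (fun ns v => if PySem.Int.mod v 2 == 0 then chanceB ns branches else max2B ns branches) nodes
  if 1 ≤ level then pyMaxI (pyMaxL ns) else 0

-- ===== PRECONDITION & SPEC =====
-- Pre_ excludes exactly the inputs where Python A yields no int: level ≤ 0 (level == 0 returns a
-- LIST, not an int; negative level recurses forever), and the level ≥ 1 inputs on which the
-- shrinking node list makes some max() hit an empty list, raising ValueError.
def Pre_expectiMax_1 (nodes : List (List Int)) (level : Int) (branches : Int) : Prop :=
  (level = 1 ∧ nodes.any (fun i => !i.isEmpty) = true)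
  ∨ (2 ≤ level ∧ PySem.Int.mod level 2 = 0 ∧
      2 ^ (((level - 2) / 2).toNat) ≤ (nodes.map List.length).sum / 2)
  ∨ (3 ≤ level ∧ PySem.Int.mod level 2 = 1 ∧ (∀ i ∈ nodes, i ≠ []) ∧
      2 ^ (((level - 3) / 2).toNat) ≤ nodes.length / 2)
instance (nodes : List (List Int)) (level : Int) (branches : Int) : Decidable (Pre_expectiMax_1 nodes level branches) := by unfold Pre_expectiMax_1; infer_instance

def pvWitness_expectiMax_1 : List (List Int) × Int × Int := ([[1, 2], [3, 4]], 1, 2)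

def Spec_expectiMax_1 (nodes : List (List Int)) (level : Int) (branches : Int) (out : Int) : Prop := out = expectiMax_1_alt nodes level branches
instance (nodes : List (List Int)) (level : Int) (branches : Int) (out : Int) : Decidable (Spec_expectiMax_1 nodes level branches out) := by unfold Spec_expectiMax_1; infer_instance

-- ===== CLAIM (what is proved, stated in full; the proofs are below) =====
def Claim_equal_expectiMax_1 : Prop := ∀ (nodes : List (List Int)) (level : Int) (branches : Int), Dom_expectiMax_1 nodes level branches → Pre_expectiMax_1 nodes level branches → Spec_expectiMax_1 nodes level branches (expectiMax_1 nodes level branches)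


-- ===== LEMMAS AND PROOFS =====

theorem modify_append_length {α : Type} (xs : List α) (y : α) (f : α → α) :
    (xs ++ [y]).modify xs.length f = xs ++ [f y] := by
  induction xs with
  | nil => simp [List.modify]
  | cons x xs ih => simp [List.modify]; simpa [List.modify] using ih

theorem modify_at {α : Type} (xs : List α) (y : α) (f : α → α) (n : Nat) (h : n = xs.length) :
    (xs ++ [y]).modify n f = xs ++ [f y] := by subst h; exact modify_append_length xs y f

theorem groupB_length : ∀ (l : List Int) (br : Int), (groupB l br).length = l.length / 2
  | [], _ => by simp [groupB]
  | [a], _ => by simp [groupB]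
  | a :: b :: t, br => by
    simp [groupB, groupB_length t br]
    omega

theorem groupB_take_all : ∀ (l : List Int) (br : Int),
    groupB (l.take (2 * (l.length / 2))) br = groupB l br
  | [], _ => by simp [groupB]
  | [a], _ => by simp [groupB]
  | a :: b :: t, br => by
    have ih := groupB_take_all t br
    have h : 2 * ((a :: b :: t).length / 2) = 2 * (t.length / 2) + 1 + 1 := by
      simp; omega
    rw [h]
    simp [List.take_succ_cons, groupB, ih]

theorem groupB_take_succ : ∀ (m : Nat) (l : List Int) (br : Int), 2 * m + 1 < l.length →
    groupB (l.take (2 * m + 2)) br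
      = groupB (l.take (2 * m)) br ++ [[l.getD (2 * m) 0, l.getD (2 * m + 1) 0]]
  | _, [], _ => by intro h; simp at h
  | _, [a], _ => by intro h; simp at h
  | 0, a :: b :: t, br => by intro _; simp [groupB]
  | m + 1, a :: b :: t, br => by
    intro h
    have ih := groupB_take_succ m t br (by simp at h ⊢; omega)
    have h1 : 2 * (m + 1) + 2 = (2 * m + 2) + 1 + 1 := by omega
    have h2 : 2 * (m + 1) = (2 * m) + 1 + 1 := by omega
    rw [h1, h2]
    simp [List.take_succ_cons, groupB, ih]

theorem groupA_loop (l : List Int) (br : Int) : ∀ (m : Nat), m ≤ l.length / 2 →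
    ((PySem.List.pyRange 0 (m : Int) 1).foldl
      (fun (st : List (List Int) × Int × Int) j =>
        let nl := st.1 ++ [([] : List Int)]
        let nl := (PySem.List.pyRange st.2.1 st.2.2 1).foldl
            (fun nl i => nl.modify j.toNat (fun row => row ++ [PySem.List.pyGetD l i 0])) nl
        (nl, st.2.2, st.2.2 + 2))
      (([] : List (List Int)), (0 : Int), (2 : Int)))
    = (groupB (l.take (2 * m)) br, ((2 * m : Nat) : Int), ((2 * m : Nat) : Int) + 2) := by
  intro m
  induction m with
  | zero => intro _; simp [PySem.List.pyRange_one_eq_nil (le_refl (0 : Int)), groupB]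
  | succ m ih =>
    intro hm
    have hmle : m ≤ l.length / 2 := by omega
    have hlen : 2 * m + 1 < l.length := by omega
    rw [show ((m + 1 : Nat) : Int) = (m : Int) + 1 by push_cast; ring,
      PySem.List.pyRange_one_succ_right (by positivity), List.foldl_append, ih hmle]
    simp only [List.foldl_cons, List.foldl_nil]
    have hrange : PySem.List.pyRange ((2 * m : Nat) : Int) (((2 * m : Nat) : Int) + 2) 1
        = [((2 * m : Nat) : Int), ((2 * m : Nat) : Int) + 1] := by
      rw [PySem.List.pyRange_one_cons (by omega)]
      rw [show ((2 * m : Nat) : Int) + 2 = (((2 * m : Nat) : Int) + 1) + 1 by ring,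
        PySem.List.pyRange_one_singleton]
    have hglen : (groupB (l.take (2 * m)) br).length = m := by
      rw [groupB_length, List.length_take]
      omega
    have hg1 : PySem.List.pyGetD l ((2 * m : Nat) : Int) 0 = l.getD (2 * m) 0 :=
      PySem.List.pyGetD_natCast l (2 * m) 0
    have hg2 : PySem.List.pyGetD l (((2 * m : Nat) : Int) + 1) 0 = l.getD (2 * m + 1) 0 := by
      rw [show ((2 * m : Nat) : Int) + 1 = ((2 * m + 1 : Nat) : Int) by push_cast; ring]
      exact PySem.List.pyGetD_natCast l (2 * m + 1) 0
    simp only [hrange, List.foldl_cons, List.foldl_nil, Int.toNat_natCast, hg1, hg2]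
    rw [modify_at _ _ _ _ hglen.symm, List.nil_append]
    rw [modify_at _ _ _ _ hglen.symm]
    simp only [List.singleton_append]
    rw [← groupB_take_succ m l br hlen]
    have h3 : 2 * (m + 1) = 2 * m + 2 := by ring
    rw [h3]
    push_cast
    simp

theorem groupA_eq_groupB (l : List Int) (branches : Int) : groupA l branches = groupB l branches := by
  unfold groupA
  rw [show PySem.Int.floordiv (l.length : Int) 2 = ((l.length / 2 : Nat) : Int) from
    PySem.Int.floordiv_natCast l.length 2]
  rw [groupA_loop l branches (l.length / 2) (le_refl _)]
  exact groupB_take_all l branches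

theorem chance_inner (f : Int → Int) : ∀ (t : List Int) (acc : List Int) (s : Int),
    (t.foldl (fun (st : List Int × Int) j => (st.1 ++ [f (st.2 + j)], st.2 + j)) (acc, s)).1
    = acc ++ (List.range t.length).map (fun k => f (s + (t.take (k+1)).sum)) := by
  intro t
  induction t with
  | nil => intro acc s; simp
  | cons j t' ih =>
    intro acc s
    simp only [List.foldl_cons, List.length_cons, List.range_succ_eq_map, List.map_cons,
      List.map_map]
    rw [ih]
    simp [Function.comp, add_assoc, List.append_assoc]

theorem chanceA_eq_chanceB (nodes : List (List Int)) (branches : Int) :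
    chanceA nodes branches = chanceB nodes branches := by
  unfold chanceA chanceB
  rw [groupA_eq_groupB]
  congr 1
  have hfun : (fun (acc : List Int) (i : List Int) =>
      (i.foldl (fun (st : List Int × Int) j =>
        (st.1 ++ [PySem.Int.floordiv (st.2 + j) (i.length : Int)], st.2 + j)) (acc, (0 : Int))).1)
      = (fun (acc : List Int) (i : List Int) => acc ++
        (List.range i.length).map (fun k =>
          PySem.Int.floordiv ((i.take (k+1)).sum) (i.length : Int))) := by
    funext acc i
    rw [chance_inner (fun x => PySem.Int.floordiv x (i.length : Int)) i acc 0]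
    simp
  rw [hfun]
  exact PySem.List.foldl_append_eq_flatMap _ _ _

theorem max2A_eq_max2B (nodes : List (List Int)) (branches : Int) :
    max2A nodes branches = max2B nodes branches := by
  unfold max2A max2B
  rw [groupA_eq_groupB]
  congr 1
  simpa using PySem.List.foldl_append_singleton_eq_map (l := nodes) (f := pyMaxI)
    (acc := ([] : List Int))

theorem expAgo_eq_alt : ∀ (n : Nat) (nodes : List (List Int)) (branches : Int),
    expAgo nodes (n + 1) branches = expectiMax_1_alt nodes ((n : Int) + 1) branches := by
  intro n
  induction n with
  | zero =>
    intro nodes br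
    simp [expAgo, expectiMax_1_alt, PySem.List.pyRange_neg_one_eq_nil (le_refl (1 : Int))]
  | succ m ih =>
    intro nodes br
    have hc : PySem.List.pyRange ((m : Int) + 2) 1 (-1)
        = ((m : Int) + 2) :: PySem.List.pyRange ((m : Int) + 1) 1 (-1) := by
      rw [PySem.List.pyRange_neg_one_cons (by omega)]
      norm_num
      rw [show (m : Int) + 2 - 1 = (m : Int) + 1 by ring]
    have step : ∀ X : List (List Int), expectiMax_1_alt X ((m : Int) + 2) br
        = expectiMax_1_alt
            (if PySem.Int.mod ((m : Int) + 2) 2 == 0 then chanceB X br else max2B X br)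
            ((m : Int) + 1) br := by
      intro X
      unfold expectiMax_1_alt
      rw [if_pos (by omega : (1 : Int) ≤ (m : Int) + 2),
        if_pos (by omega : (1 : Int) ≤ (m : Int) + 1), hc, List.foldl_cons]
    have hgoal : expAgo nodes (m + 2) br = expectiMax_1_alt nodes ((m : Int) + 2) br := by
      rw [expAgo, step]
      by_cases h : (PySem.Int.mod ((m : Int) + 2) 2 == 0) = true
      · rw [if_pos h, if_pos h, ih, chanceA_eq_chanceB]
      · rw [if_neg h, if_neg h, ih, max2A_eq_max2B]
    rw [show ((m + 1 : Nat) : Int) + 1 = (m : Int) + 2 by push_cast; ring]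
    exact hgoal

-- ===== VERDICT (by name: the statement is the Claim_ definition above) =====
theorem expectiMax_1_spec : Claim_equal_expectiMax_1 := by
  intro nodes level branches _ hpre
  unfold Spec_expectiMax_1
  have h1 : 1 ≤ level := by
    rcases hpre with ⟨h, _⟩ | ⟨h, _⟩ | ⟨h, _⟩ <;> omega
  obtain ⟨n, hn⟩ : ∃ n : Nat, level = (n : Int) + 1 := ⟨(level - 1).toNat, by omega⟩
  subst hn
  rw [expectiMax_1, if_neg (by omega)]
  have : ((n : Int) + 1).toNat = n + 1 := by omega
  rw [this, expAgo_eq_alt]
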